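-- pv_equiv track=rewrite | github.com/spsaswat/APPF_FLIR | camera_calibration.py | process_and_flatten_points
-- ===== SOURCE A (Python) =====
-- def process_and_flatten_points(points, y_tolerance=10):
--     '''
--     Process and sort the circle centers first by their y-coordinates (within a tolerance) and then by their x-coordinates
--     to facilitate accurate matching and error calculation between two sets of points.
--     Mainly used to calculate the error. Since the center array is in disorder, it needs to be sorted according to specific
--     rules so that they can correspond one to one.
--
--     Parameters:
--         points (list of tuples): The list of circle centers as (x, y) tuples.
--         y_tolerance (int): The tolerance in pixels within which points are considered to be on the same horizontal level.
--
--     Returns: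
--         list: A flattened list of points sorted within grouped y levels and then by x coordinates.
--     '''
--
--     # Grouping: Group by y coordinate, and tolerate small changes in the y coordinate within the same group
--     def group_points_by_y(points, y_tolerance):
--         '''
--         Group points based on their y-coordinate with a specified tolerance, acknowledging slight variations in alignment.
--
--         Parameters:
--             points (list of tuples): List of points to group.
--             y_tolerance (int): Tolerance for grouping points by their y-coordinate.
--
--         Returns:
--             list of lists: Grouped points based on y-coordinate.
--         '''
--         if not points:
--             return []
--         # Sort all points by y coordinate
--         sorted_points = sorted(points, key=lambda x: x[1])
--         # Initialize grouping
--         groups = []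
--         current_group = [sorted_points[0]]  # Start the first group with the first point
--         for point in sorted_points[1:]:
--             if abs(point[1] - current_group[-1][1]) <= y_tolerance:
--                 # If the y coordinate of the current point is similar to the y coordinate of the last point in the current group, add it to the current group.
--                 current_group.append(point)
--             else:
--                 # Otherwise, start a new group
--                 groups.append(current_group)
--                 current_group = [point]
--         # Add the last group
--         if current_group:
--             groups.append(current_group)
--         return groups
--
--     # Sort the points in each group by x coordinate
--     def sort_groups_by_x(groups):
--         '''
--         Sort each group of points by their x-coordinate.
--
--         Parameters:
--             groups (list of lists): Groups of points to sort by x-coordinate.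
--
--         Returns:
--             list of lists: Groups of points sorted by x-coordinate.
--         '''
--         return [sorted(group, key=lambda x: x[0]) for group in groups]
--
--     # Group the input points
--     grouped_points = group_points_by_y(points, y_tolerance)
--     # Sort the points in each group by x coordinate
--     sorted_grouped_points = sort_groups_by_x(grouped_points)
--     # Flatten the list
--     flattened_list = [point for group in sorted_grouped_points for point in group]
--     return flattened_list
-- ===== SOURCE B (Python) =====
-- def process_and_flatten_points(points, y_tolerance=10):
--     """Tag each y-sorted point with a group id in one linear pass, then use two
--     whole-list stable sorts (by x, then by group id) instead of a list-of-lists,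
--     per-group sorts and a flatten step."""
--     if not points:
--         return []
--     ys = sorted(points, key=lambda p: p[1])
--     gid = 0
--     prev = ys[0]
--     tagged = [(0, ys[0])]
--     for p in ys[1:]:
--         if abs(p[1] - prev[1]) > y_tolerance:
--             gid += 1
--         tagged.append((gid, p))
--         prev = p
--     tagged.sort(key=lambda t: t[1][0])
--     tagged.sort(key=lambda t: t[0])
--     return [p for _, p in tagged]
-- ===== Notes on version B (the rewrite author's own statement) =====
-- stated objective: alternative
-- what changed: Replaces the list-of-lists grouping, per-group sorts and flatten with a linear pass that tags each y-sorted point with an integer group id followed by two whole-list stable sorts (by x, then by group id).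
import Mathlib
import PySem

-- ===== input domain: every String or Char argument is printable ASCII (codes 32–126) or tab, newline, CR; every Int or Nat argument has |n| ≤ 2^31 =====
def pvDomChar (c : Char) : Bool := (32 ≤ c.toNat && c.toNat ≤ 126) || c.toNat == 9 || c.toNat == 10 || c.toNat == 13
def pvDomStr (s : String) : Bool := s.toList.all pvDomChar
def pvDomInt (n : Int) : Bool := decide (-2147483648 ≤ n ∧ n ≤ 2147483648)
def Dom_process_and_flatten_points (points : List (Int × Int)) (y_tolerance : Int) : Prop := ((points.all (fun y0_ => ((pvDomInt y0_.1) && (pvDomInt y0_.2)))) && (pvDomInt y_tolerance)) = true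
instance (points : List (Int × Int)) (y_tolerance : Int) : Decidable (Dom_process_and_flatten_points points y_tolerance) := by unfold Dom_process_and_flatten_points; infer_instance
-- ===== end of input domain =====

-- B replaces A's group-into-lists / sort-each-group / flatten pipeline by a linear
-- group-id tagging pass followed by two whole-list stable sorts (objective: alternative).

-- ===== PORT A =====
-- group_points_by_y: sort by y, then one pass chaining points into groups
-- (current_group[-1] on the always-nonempty current group is ported as getLastD).
def process_and_flatten_points (points : List (Int × Int)) (y_tolerance : Int) : List (Int × Int) :=
  let groups : List (List (Int × Int)) :=
    match PySem.List.sorted points (fun p => p.2) with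
    | [] => []
    | s0 :: rest =>
      let st := rest.foldl
        (fun (st : List (List (Int × Int)) × List (Int × Int)) p =>
          if |p.2 - (st.2.getLastD (0, 0)).2| ≤ y_tolerance then (st.1, st.2 ++ [p])
          else (st.1 ++ [st.2], [p]))
        ([], [s0])
      if st.2 = [] then st.1 else st.1 ++ [st.2]
  let sorted_grouped := groups.map (fun g => PySem.List.sorted g (fun p => p.1))
  sorted_grouped.flatMap id

-- ===== PORT B =====
-- 'if not points: return []' and ys[0]/ys[1:] are ported by matching on the sorted
-- list (sorted points = [] exactly when points = []).
def process_and_flatten_points_alt (points : List (Int × Int)) (y_tolerance : Int) : List (Int × Int) :=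
  match PySem.List.sorted points (fun p => p.2) with
  | [] => []
  | s0 :: rest =>
    let st := rest.foldl
      (fun (st : Int × (Int × Int) × List (Int × (Int × Int))) p =>
        let gid := if |p.2 - st.2.1.2| > y_tolerance then st.1 + 1 else st.1
        (gid, p, st.2.2 ++ [(gid, p)]))
      (0, s0, [(0, s0)])
    let t1 := PySem.List.sorted st.2.2 (fun t => t.2.1)
    let t2 := PySem.List.sorted t1 (fun t => t.1)
    t2.map (fun t => t.2)

-- ===== PRECONDITION & SPEC =====
def Spec_process_and_flatten_points (points : List (Int × Int)) (y_tolerance : Int) (out : List (Int × Int)) : Prop := out = process_and_flatten_points_alt points y_tolerance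
instance (points : List (Int × Int)) (y_tolerance : Int) (out : List (Int × Int)) : Decidable (Spec_process_and_flatten_points points y_tolerance out) := by unfold Spec_process_and_flatten_points; infer_instance

-- ===== CLAIM (what is proved, stated in full; the proofs are below) =====
def Claim_equal_process_and_flatten_points : Prop := ∀ (points : List (Int × Int)) (y_tolerance : Int), Dom_process_and_flatten_points points y_tolerance → Spec_process_and_flatten_points points y_tolerance (process_and_flatten_points points y_tolerance)

-- ===== LEMMAS AND PROOFS =====

theorem pv_insert_cons {α : Type} (key : α → Int) (x : α) (L : List α)
    (h : ∀ y ∈ L, key x < key y) :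
    PySem.List.insertBy (fun a b => decide (key a < key b)) x L = x :: L := by
  cases L with
  | nil => simp [PySem.List.insertBy]
  | cons y ys => simp [PySem.List.insertBy, h y (by simp)]

theorem pv_insert_append {α : Type} (key : α → Int) (x : α) (P Q : List α)
    (h : ∀ y ∈ P, ¬ key x < key y) :
    PySem.List.insertBy (fun a b => decide (key a < key b)) x (P ++ Q)
      = P ++ PySem.List.insertBy (fun a b => decide (key a < key b)) x Q := by
  induction P with
  | nil => simp
  | cons y P ih =>
    have hy : ¬ key x < key y := h y (by simp)
    simp [PySem.List.insertBy, hy, ih (fun z hz => h z (by simp [hz]))]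

theorem pv_sorted_snoc {α : Type} (key : α → Int) (xs : List α) (x : α) :
    PySem.List.sorted (xs ++ [x]) key false
      = PySem.List.insertBy (fun a b => decide (key a < key b)) x (PySem.List.sorted xs key false) := by
  simp [PySem.List.sorted, List.foldl_append]

theorem pv_filter_insert {α : Type} (key : α → Int) (p : α → Bool) (x : α) (S : List α)
    (hS : S.Pairwise (fun a b => key a ≤ key b)) :
    (PySem.List.insertBy (fun a b => decide (key a < key b)) x S).filter p
      = if p x then PySem.List.insertBy (fun a b => decide (key a < key b)) x (S.filter p)
        else S.filter p := by
  induction S with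
  | nil => cases hpx : p x <;> simp [PySem.List.insertBy, hpx]
  | cons y S ih =>
    rcases List.pairwise_cons.mp hS with ⟨hy, hS'⟩
    by_cases hxy : key x < key y
    · rw [show PySem.List.insertBy (fun a b => decide (key a < key b)) x (y :: S) = x :: y :: S from by
        simp [PySem.List.insertBy, hxy]]
      cases hpx : p x
      · simp [hpx]
      · have : ∀ z ∈ (y :: S).filter p, key x < key z := by
          intro z hz
          rcases List.mem_filter.mp hz with ⟨hz, -⟩
          rcases List.mem_cons.mp hz with rfl | hz
          · exact hxy
          · exact lt_of_lt_of_le hxy (hy z hz)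
        rw [pv_insert_cons key x _ this]
        simp [hpx]
    · rw [show PySem.List.insertBy (fun a b => decide (key a < key b)) x (y :: S)
          = y :: PySem.List.insertBy (fun a b => decide (key a < key b)) x S from by
        simp [PySem.List.insertBy, hxy]]
      cases hpy : p y <;> cases hpx : p x <;>
        simp [hpx, hpy, ih hS', PySem.List.insertBy, hxy]

theorem pv_filter_sorted {α : Type} (key : α → Int) (p : α → Bool) (U : List α) :
    (PySem.List.sorted U key false).filter p = PySem.List.sorted (U.filter p) key false := by
  induction U using List.reverseRecOn with
  | nil => simp [PySem.List.sorted]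
  | append_singleton U x ih =>
    rw [pv_sorted_snoc, pv_filter_insert key p x _ (PySem.List.sorted_pairwise U key),
      List.filter_append, ih]
    cases hpx : p x <;> simp [hpx, PySem.List.sorted, List.foldl_append]

theorem pv_insert_map {α β : Type} (key : β → Int) (f : α → β) (x : α) (L : List α) :
    PySem.List.insertBy (fun a b => decide (key a < key b)) (f x) (L.map f)
      = (PySem.List.insertBy (fun a b => decide (key (f a) < key (f b))) x L).map f := by
  induction L with
  | nil => simp [PySem.List.insertBy]
  | cons y L ih =>
    by_cases hxy : key (f x) < key (f y) <;> simp [PySem.List.insertBy, hxy, ih]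

theorem pv_sorted_map {α β : Type} (key : β → Int) (f : α → β) (U : List α) :
    PySem.List.sorted (U.map f) key false
      = (PySem.List.sorted U (fun a => key (f a)) false).map f := by
  induction U using List.reverseRecOn with
  | nil => simp [PySem.List.sorted]
  | append_singleton U x ih =>
    rw [List.map_append, List.map_singleton, pv_sorted_snoc, pv_sorted_snoc, ih, pv_insert_map]

theorem pv_flatMap_congr {α β : Type} (l : List α) (f g : α → List β)
    (h : ∀ a ∈ l, f a = g a) : l.flatMap f = l.flatMap g := by
  simp only [List.flatMap_def]
  rw [List.map_congr_left h]

theorem pv_sortfst {β : Type} (U : List (Int × β)) (m : Nat)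
    (hb : ∀ t ∈ U, 0 ≤ t.1 ∧ t.1 < (m : Int)) :
    PySem.List.sorted U (fun t => t.1) false
      = (List.range m).flatMap (fun i : Nat => U.filter (fun t => decide (t.1 = (i : Int)))) := by
  induction U using List.reverseRecOn with
  | nil => simp [PySem.List.sorted]
  | append_singleton U x ih =>
    have hx := hb x (by simp)
    have hb' : ∀ t ∈ U, 0 ≤ t.1 ∧ t.1 < (m : Int) := fun t ht => hb t (by simp [ht])
    set j := x.1.toNat with hjdef
    have hj : (j : Int) = x.1 := Int.toNat_of_nonneg hx.1
    have hjm : j < m := by omega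
    have hm : m = (j + 1) + (m - j - 1) := by omega
    set F := fun i : Nat => U.filter (fun t => decide (t.1 = (i : Int))) with hF
    -- RHS
    have hGF : ∀ i : Nat, i ≠ j →
        (U ++ [x]).filter (fun t => decide (t.1 = (i : Int))) = F i := by
      intro i hij
      have : ¬ x.1 = (i : Int) := by omega
      simp [List.filter_append, this, hF]
    have hGj : (U ++ [x]).filter (fun t => decide (t.1 = (j : Int))) = F j ++ [x] := by
      simp [List.filter_append, hj, hF]
    have hsplit : List.range m = List.range (j + 1) ++ (List.range (m - j - 1)).map ((j + 1) + ·) := by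
      conv_lhs => rw [hm]
      rw [List.range_add]
    have hrhs : (List.range m).flatMap (fun i : Nat => (U ++ [x]).filter (fun t => decide (t.1 = (i : Int))))
        = ((List.range (j + 1)).flatMap F ++ [x]) ++ ((List.range (m - j - 1)).map ((j + 1) + ·)).flatMap F := by
      rw [hsplit, List.flatMap_append]
      congr 1
      · rw [List.range_succ, List.flatMap_append, List.flatMap_append,
          pv_flatMap_congr _ _ F (fun i hi => hGF i (by simp at hi; omega))]
        simp [hF, hj]
      · refine pv_flatMap_congr _ _ _ ?_
        intro i hi
        rcases List.mem_map.mp hi with ⟨k, -, rfl⟩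
        simpa using hGF (j + 1 + k) (show j + 1 + k ≠ j by omega)
    -- LHS
    have hP : ∀ y ∈ (List.range (j + 1)).flatMap F, ¬ x.1 < y.1 := by
      intro y hy
      rcases List.mem_flatMap.mp hy with ⟨i, hi, hyF⟩
      have h1 : y.1 = (i : Int) := by
        have := (List.mem_filter.mp hyF).2; simpa using this
      simp at hi
      omega
    have hQ : ∀ y ∈ ((List.range (m - j - 1)).map ((j + 1) + ·)).flatMap F, x.1 < y.1 := by
      intro y hy
      rcases List.mem_flatMap.mp hy with ⟨i, hi, hyF⟩
      have h1 : y.1 = (i : Int) := by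
        have := (List.mem_filter.mp hyF).2; simpa using this
      rcases List.mem_map.mp hi with ⟨k, -, rfl⟩
      omega
    rw [pv_sorted_snoc, ih hb', hrhs, hsplit, List.flatMap_append,
      pv_insert_append _ _ _ _ hP, pv_insert_cons _ _ _ hQ]
    simp

def pvFlatTag (n : Nat) : List (List (Int × Int)) → List (Int × (Int × Int))
  | [] => []
  | g :: gs => g.map (fun p => ((n : Int), p)) ++ pvFlatTag (n + 1) gs

theorem pv_flatTag_bounds : ∀ (gs : List (List (Int × Int))) (n : Nat) (t : Int × (Int × Int)),
    t ∈ pvFlatTag n gs → (n : Int) ≤ t.1 ∧ t.1 < (n : Int) + gs.length := by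
  intro gs
  induction gs with
  | nil => intro n t ht; simp [pvFlatTag] at ht
  | cons g gs ih =>
    intro n t ht
    rcases List.mem_append.mp ht with h | h
    · rcases List.mem_map.mp h with ⟨p, -, rfl⟩
      show (n : Int) ≤ (n : Int) ∧ (n : Int) < (n : Int) + ((g :: gs).length : Int)
      simp only [List.length_cons]; push_cast; omega
    · have := ih (n + 1) t h
      simp at this ⊢; omega

theorem pv_flatTag_append (gs1 gs2 : List (List (Int × Int))) : ∀ n,
    pvFlatTag n (gs1 ++ gs2) = pvFlatTag n gs1 ++ pvFlatTag (n + gs1.length) gs2 := by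
  induction gs1 with
  | nil => intro n; simp [pvFlatTag]
  | cons g gs ih =>
    intro n
    simp only [List.cons_append, pvFlatTag, ih (n + 1), List.append_assoc, List.length_cons]
    congr 3
    omega

theorem pv_flatTag_filter : ∀ (gs : List (List (Int × Int))) (n i : Nat),
    (pvFlatTag n gs).filter (fun t => decide (t.1 = ((n + i : Nat) : Int)))
      = ((gs.getD i []).map (fun p => (((n + i : Nat) : Int), p))) := by
  intro gs
  induction gs with
  | nil => intro n i; simp [pvFlatTag]
  | cons g gs ih =>
    intro n i
    rw [pvFlatTag, List.filter_append]
    cases i with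
    | zero =>
      have h1 : (g.map (fun p => ((n : Int), p))).filter (fun t => decide (t.1 = ((n + 0 : Nat) : Int)))
          = g.map (fun p => ((n : Int), p)) := by
        apply List.filter_eq_self.mpr
        intro t ht
        rcases List.mem_map.mp ht with ⟨p, -, rfl⟩
        simp
      have h2 : (pvFlatTag (n + 1) gs).filter (fun t => decide (t.1 = ((n + 0 : Nat) : Int))) = [] := by
        apply List.filter_eq_nil_iff.mpr
        intro t ht
        have := pv_flatTag_bounds gs (n + 1) t ht
        simp at this ⊢; omega
      rw [h1, h2]
      simp
    | succ i' =>
      have h1 : (g.map (fun p => ((n : Int), p))).filter (fun t => decide (t.1 = ((n + (i' + 1) : Nat) : Int))) = [] := by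
        apply List.filter_eq_nil_iff.mpr
        intro t ht
        rcases List.mem_map.mp ht with ⟨p, -, rfl⟩
        simp; omega
      have h2 := ih (n + 1) i'
      rw [h1, List.nil_append]
      have hcast : ((n + 1 + i' : Nat) : Int) = ((n + (i' + 1) : Nat) : Int) := by push_cast; ring
      rw [hcast] at h2
      rw [h2]
      simp

theorem pv_range_flatMap_getD {β : Type} (f : List (Int × Int) → List β) :
    ∀ gs : List (List (Int × Int)),
    (List.range gs.length).flatMap (fun i => f (gs.getD i [])) = gs.flatMap f := by
  intro gs
  induction gs with
  | nil => simp
  | cons g gs ih =>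
    rw [List.length_cons, List.range_succ_eq_map, List.flatMap_cons, List.flatMap_map]
    simp only [List.getD_cons_zero, List.getD_cons_succ, List.flatMap_cons]
    rw [← ih]

theorem pv_chain (gs : List (List (Int × Int))) :
    (PySem.List.sorted (PySem.List.sorted (pvFlatTag 0 gs) (fun t => t.2.1) false) (fun t => t.1) false).map (fun t => t.2)
      = gs.flatMap (fun g => PySem.List.sorted g (fun p => p.1) false) := by
  have hb : ∀ t ∈ PySem.List.sorted (pvFlatTag 0 gs) (fun t => t.2.1) false,
      0 ≤ t.1 ∧ t.1 < (gs.length : Int) := by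
    intro t ht
    have hmem : t ∈ pvFlatTag 0 gs := by
      have := (PySem.List.mem_sorted (xs := pvFlatTag 0 gs) (key := fun t => t.2.1) (rev := false) (x := t)).mp ht
      exact this
    have := pv_flatTag_bounds gs 0 t hmem
    simpa using this
  rw [pv_sortfst _ gs.length hb]
  have hstep : ∀ i ∈ List.range gs.length,
      (PySem.List.sorted (pvFlatTag 0 gs) (fun t => t.2.1) false).filter (fun t => decide (t.1 = (i : Int)))
        = (PySem.List.sorted (gs.getD i []) (fun p => p.1) false).map (fun p => ((i : Int), p)) := by
    intro i hi
    rw [pv_filter_sorted]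
    have hft := pv_flatTag_filter gs 0 i
    simp only [Nat.zero_add] at hft
    rw [hft, pv_sorted_map (fun t => t.2.1) (fun p => ((i : Int), p)) (gs.getD i [])]
  rw [pv_flatMap_congr _ _ _ hstep, List.map_flatMap]
  simp only [List.map_map]
  have : ∀ i : Nat, ((PySem.List.sorted (gs.getD i []) (fun p => p.1) false).map
      ((fun t : Int × (Int × Int) => t.2) ∘ (fun p => ((i : Int), p))))
      = PySem.List.sorted (gs.getD i []) (fun p => p.1) false := by
    intro i; simp
  rw [pv_flatMap_congr _ _ _ (fun i _ => this i)]
  exact pv_range_flatMap_getD _ gs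

theorem pv_inv (tol : Int) :
    ∀ (rest : List (Int × Int)) (grps : List (List (Int × Int))) (cur : List (Int × Int)) (prev : Int × Int),
    cur ≠ [] → prev = cur.getLastD (0, 0) →
    ((rest.foldl (fun (st : List (List (Int × Int)) × List (Int × Int)) p =>
        if |p.2 - (st.2.getLastD (0, 0)).2| ≤ tol then (st.1, st.2 ++ [p])
        else (st.1 ++ [st.2], [p])) (grps, cur)).2 ≠ [] ∧
     (rest.foldl (fun (st : Int × (Int × Int) × List (Int × (Int × Int))) p =>
        let gid := if |p.2 - st.2.1.2| > tol then st.1 + 1 else st.1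
        (gid, p, st.2.2 ++ [(gid, p)])) ((grps.length : Int), prev, pvFlatTag 0 (grps ++ [cur]))).2.2
       = pvFlatTag 0
          (((rest.foldl (fun (st : List (List (Int × Int)) × List (Int × Int)) p =>
              if |p.2 - (st.2.getLastD (0, 0)).2| ≤ tol then (st.1, st.2 ++ [p])
              else (st.1 ++ [st.2], [p])) (grps, cur))).1
            ++ [((rest.foldl (fun (st : List (List (Int × Int)) × List (Int × Int)) p =>
              if |p.2 - (st.2.getLastD (0, 0)).2| ≤ tol then (st.1, st.2 ++ [p])
              else (st.1 ++ [st.2], [p])) (grps, cur))).2])) := by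
  intro rest
  induction rest with
  | nil =>
    intro grps cur prev hne hprev
    exact ⟨hne, rfl⟩
  | cons p rest ih =>
    intro grps cur prev hne hprev
    simp only [List.foldl_cons]
    by_cases h : |p.2 - (cur.getLastD (0, 0)).2| ≤ tol
    · rw [if_pos h]
      have hgt : ¬ |p.2 - prev.2| > tol := by rw [hprev]; omega
      simp only [if_neg hgt]
      have hT : pvFlatTag 0 (grps ++ [cur]) ++ [((grps.length : Int), p)]
          = pvFlatTag 0 (grps ++ [cur ++ [p]]) := by
        rw [pv_flatTag_append, pv_flatTag_append]
        simp [pvFlatTag]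
      rw [hT]
      exact ih grps (cur ++ [p]) p (by simp) (by simp)
    · rw [if_neg h]
      have hgt : |p.2 - prev.2| > tol := by rw [hprev]; omega
      simp only [if_pos hgt]
      have hlen : (grps.length : Int) + 1 = ((grps ++ [cur]).length : Int) := by
        simp
      rw [hlen]
      rw [show pvFlatTag 0 (grps ++ [cur]) ++ [((((grps ++ [cur]).length : Nat) : Int), p)]
            = pvFlatTag 0 ((grps ++ [cur]) ++ [[p]]) from by
          rw [pv_flatTag_append (grps ++ [cur]) [[p]] 0]
          simp [pvFlatTag]]
      exact ih (grps ++ [cur]) [p] p (by simp) (by simp)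

theorem pv_main : ∀ (points : List (Int × Int)) (y_tolerance : Int),
    process_and_flatten_points points y_tolerance = process_and_flatten_points_alt points y_tolerance := by
  intro points tol
  unfold process_and_flatten_points process_and_flatten_points_alt
  cases hS : PySem.List.sorted points (fun p => p.2) with
  | nil => simp
  | cons s0 rest =>
    simp only []
    obtain ⟨hne, hT⟩ := pv_inv tol rest [] [s0] s0 (by simp) (by simp)
    have hT0 : pvFlatTag 0 ([] ++ [[s0]]) = [((0 : Int), s0)] := by simp [pvFlatTag]
    rw [show ((List.length ([] : List (List (Int × Int))) : Int)) = (0 : Int) from by simp] at hT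
    rw [hT0] at hT
    rw [if_neg hne, hT, pv_chain]
    simp [List.flatMap_def]

-- ===== VERDICT (by name: the statement is the Claim_ definition above) =====
theorem process_and_flatten_points_spec : Claim_equal_process_and_flatten_points := by
  intro points y_tolerance _
  unfold Spec_process_and_flatten_points
  exact pv_main points y_tolerance
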